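-- pv_equiv track=rewrite | github.com/Xenokrat/algo_ex_28 | odometer.py | odometer
-- ===== SOURCE A (Python) =====
-- def odometer(oksana: list[int]) -> int:
--     distance = 0
--     time_start = 0
--     points = len(oksana) - 1
--
--     for i in range(0, points, 2):
--         time_delta = oksana[i + 1] - time_start
--         time_start = oksana[i + 1]
--         distance += oksana[i] * time_delta
--
--     return distance
-- ===== SOURCE B (Python) =====
-- def odometer(oksana: list[int]) -> int:
--     speeds = oksana[0::2]
--     times = oksana[1::2]
--     pts = [0] + times
--     deltas = [b - a for a, b in zip(pts, times)]
--     return sum(s * d for s, d in zip(speeds, deltas))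
-- ===== Notes on version B (the rewrite author's own statement) =====
-- stated objective: alternative
-- what changed: Replaces the fused index loop with running time_start state by un-interleaving the input into speed/time slices, building an explicit delta table by zipping the time sequence with itself shifted by one, and reducing with a zip dot-product.
import Mathlib
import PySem

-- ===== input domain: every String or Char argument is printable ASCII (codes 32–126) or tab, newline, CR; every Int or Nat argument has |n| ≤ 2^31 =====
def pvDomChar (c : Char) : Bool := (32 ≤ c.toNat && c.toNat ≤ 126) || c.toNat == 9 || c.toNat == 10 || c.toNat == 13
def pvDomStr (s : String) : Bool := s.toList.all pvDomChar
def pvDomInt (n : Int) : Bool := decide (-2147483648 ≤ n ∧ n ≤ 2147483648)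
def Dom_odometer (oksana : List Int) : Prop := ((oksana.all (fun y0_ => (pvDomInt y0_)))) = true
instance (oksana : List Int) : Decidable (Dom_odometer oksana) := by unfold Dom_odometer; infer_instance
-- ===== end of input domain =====

-- B replaces A's fused accumulator loop by slice/zip phases (a delta table, then a zip dot product); same value, alternative decomposition.

-- ===== PORT A =====
-- literal port: 'for i in range(0, len(oksana)-1, 2)' threading (distance, time_start);
-- the loop indices i, i+1 are always in range, so pyGetD's default is never consulted.
def odometer (oksana : List Int) : Int :=
  let points : Int := (oksana.length : Int) - 1
  ((PySem.List.pyRange 0 points 2).foldl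
    (fun st i =>
      let timeDelta := PySem.List.pyGetD oksana (i + 1) 0 - st.2
      (st.1 + PySem.List.pyGetD oksana i 0 * timeDelta, PySem.List.pyGetD oksana (i + 1) 0))
    ((0 : Int), (0 : Int))).1

-- ===== PORT B =====
-- literal port of Source B; oksana[0::2] / oksana[1::2] are slice? with step 2 (never none there, hence .getD []).
def odometer_alt (oksana : List Int) : Int :=
  let speeds := (PySem.List.slice? oksana (some 0) none 2).getD []
  let times := (PySem.List.slice? oksana (some 1) none 2).getD []
  let pts := (0 : Int) :: times
  let deltas := (pts.zip times).map (fun p => p.2 - p.1)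
  ((speeds.zip deltas).map (fun p => p.1 * p.2)).sum

-- ===== PRECONDITION & SPEC =====
def Spec_odometer (oksana : List Int) (out : Int) : Prop := out = odometer_alt oksana
instance (oksana : List Int) (out : Int) : Decidable (Spec_odometer oksana out) := by unfold Spec_odometer; infer_instance

-- ===== CLAIM (what is proved, stated in full; the proofs are below) =====
def Claim_equal_odometer : Prop := ∀ (oksana : List Int), Dom_odometer oksana → Spec_odometer oksana (odometer oksana)

-- ===== LEMMAS AND PROOFS =====

-- time_start before the k-th pair is processed, and the k-th pair's contribution
def pvT (xs : List Int) (k : Nat) : Int :=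
  if k = 0 then 0 else PySem.List.pyGetD xs (2 * (k : Int) - 1) 0

def pvE (xs : List Int) (k : Nat) : Int :=
  PySem.List.pyGetD xs (2 * (k : Int)) 0 * (PySem.List.pyGetD xs (2 * (k : Int) + 1) 0 - pvT xs k)

lemma foldA (xs : List Int) (K : Nat) (d : Int) :
    ((List.range K).map (fun k : Nat => (0 : Int) + 2 * (k : Int))).foldl
      (fun st i =>
        (st.1 + PySem.List.pyGetD xs i 0 * (PySem.List.pyGetD xs (i + 1) 0 - st.2),
         PySem.List.pyGetD xs (i + 1) 0))
      (d, 0)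
    = (d + ((List.range K).map (pvE xs)).sum, pvT xs K) := by
  induction K with
  | zero => simp [pvT]
  | succ n ih =>
    rw [List.range_succ, List.map_append, List.foldl_append, ih, List.map_append, List.sum_append]
    have h1 : (0:Int) + 2 * (n:Int) = 2 * (n:Int) := by ring
    refine Prod.ext ?_ ?_
    · simp only [List.map_cons, List.map_nil, List.foldl_cons, List.foldl_nil, List.sum_cons,
        List.sum_nil, h1]
      simp [pvE]; ring
    · simp only [List.map_cons, List.map_nil, List.foldl_cons, List.foldl_nil, h1]
      show PySem.List.pyGetD xs (2 * (n:Int) + 1) 0 = pvT xs (n+1)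
      rw [pvT]
      have h4 : (2:Int) * ((n:Int) + 1) - 1 = 2 * (n:Int) + 1 := by ring
      simp only [Nat.add_eq_zero_iff, one_ne_zero, and_false, if_false, Nat.cast_add,
        Nat.cast_one, h4]

lemma fmOdd (xs : List Int) (c : Nat) (hc : ∀ k, k < c → 2 * k + 1 < xs.length) :
    List.filterMap (fun x : Nat => xs[((1:Int) + 2 * (x:Int)).toNat]?) (List.range c)
      = (List.range c).map (fun k : Nat => PySem.List.pyGetD xs (2 * (k : Int) + 1) 0) := by
  have H : ∀ a ∈ List.range c,
      xs[((1:Int) + 2 * (a:Int)).toNat]? = some (PySem.List.pyGetD xs (2 * (a : Int) + 1) 0) := by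
    intro a ha
    have hlt := hc a (List.mem_range.mp ha)
    have ht : ((1:Int) + 2 * (a:Int)).toNat = 2 * a + 1 := by omega
    rw [ht, List.getElem?_eq_getElem hlt]
    rw [PySem.List.pyGetD_eq_getElem xs 0 (by positivity) (by exact_mod_cast by omega)]
    have h2 : ((2:Int) * (a:Int) + 1).toNat = 2 * a + 1 := by omega
    simp [h2]
  rw [List.filterMap_congr H]
  exact congrFun List.filterMap_eq_map (List.range c)

lemma fmEven (xs : List Int) (c : Nat) (hc : ∀ k, k < c → 2 * k < xs.length) :
    List.filterMap (fun x : Nat => xs[((2:Int) * (x:Int)).toNat]?) (List.range c)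
      = (List.range c).map (fun k : Nat => PySem.List.pyGetD xs (2 * (k : Int)) 0) := by
  have H : ∀ a ∈ List.range c,
      xs[((2:Int) * (a:Int)).toNat]? = some (PySem.List.pyGetD xs (2 * (a : Int)) 0) := by
    intro a ha
    have hlt := hc a (List.mem_range.mp ha)
    have ht : ((2:Int) * (a:Int)).toNat = 2 * a := by omega
    rw [ht, List.getElem?_eq_getElem hlt]
    rw [PySem.List.pyGetD_eq_getElem xs 0 (by positivity) (by exact_mod_cast by omega)]
    have h2 : ((2:Int) * (a:Int)).toNat = 2 * a := by omega
    simp [h2]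
  rw [List.filterMap_congr H]
  exact congrFun List.filterMap_eq_map (List.range c)

lemma odds_eq (xs : List Int) :
    (PySem.List.slice? xs (some 1) none 2).getD []
      = (List.range (xs.length / 2)).map (fun k : Nat => PySem.List.pyGetD xs (2 * (k : Int) + 1) 0) := by
  simp only [PySem.List.slice?, PySem.List.sliceIndices]
  norm_num
  by_cases h0 : xs.length = 0
  · simp [List.length_eq_zero_iff.mp h0]
  · have hm : min (1:Int) (xs.length:Int) = 1 := by omega
    rw [hm]
    by_cases h1 : 1 < xs.length
    · rw [if_pos (by exact_mod_cast h1)]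
      have hcount : (((xs.length:Int) - 1 + 2 - 1) / 2).toNat = xs.length / 2 := by omega
      rw [hcount]
      exact fmOdd xs _ (fun k hk => by omega)
    · have hl : xs.length = 1 := by omega
      rw [if_neg (by exact_mod_cast h1)]
      simp [hl]

lemma evens_eq (xs : List Int) :
    (PySem.List.slice? xs (some 0) none 2).getD []
      = (List.range ((xs.length + 1) / 2)).map (fun k : Nat => PySem.List.pyGetD xs (2 * (k : Int)) 0) := by
  simp only [PySem.List.slice?, PySem.List.sliceIndices]
  norm_num
  by_cases h0 : xs.length = 0
  · simp [List.length_eq_zero_iff.mp h0]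
  · rw [if_pos (Nat.pos_of_ne_zero h0)]
    have hcount : (((xs.length:Int) + 2 - 1) / 2).toNat = (xs.length + 1) / 2 := by omega
    rw [hcount]
    exact fmEven xs _ (fun k hk => by omega)

lemma zipMapRange {α β : Type} (f : Nat → α) (h : Nat → β) (K K' : Nat) (hK : K ≤ K') :
    (((List.range K').map f).zip ((List.range K).map h))
      = (List.range K).map (fun k => (f k, h k)) := by
  apply List.ext_getElem
  · simp [Nat.min_eq_right hK]
  · intro i h1 h2
    simp [List.getElem_zip]

lemma consZipSelf (f : Nat → Int) (K : Nat) :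
    (((0 : Int) :: (List.range K).map f).zip ((List.range K).map f))
      = (List.range K).map (fun k => ((if k = 0 then (0 : Int) else f (k - 1)), f k)) := by
  apply List.ext_getElem
  · simp
  · intro i h1 h2
    simp [List.getElem_zip]
    cases i with
    | zero => simp
    | succ j => simp

lemma A_eq (xs : List Int) :
    odometer xs = ((List.range (xs.length / 2)).map (pvE xs)).sum := by
  show ((PySem.List.pyRange 0 ((xs.length : Int) - 1) 2).foldl
      (fun st i =>
        (st.1 + PySem.List.pyGetD xs i 0 * (PySem.List.pyGetD xs (i + 1) 0 - st.2),
         PySem.List.pyGetD xs (i + 1) 0))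
      ((0 : Int), (0 : Int))).1 = _
  rw [PySem.List.pyRange_of_pos 0 ((xs.length : Int) - 1) (by norm_num)]
  have hA : (if (0:Int) < (xs.length:Int) - 1
      then (((xs.length:Int) - 1 - 0 + 2 - 1) / 2).toNat else 0) = xs.length / 2 := by
    split_ifs <;> omega
  rw [hA, foldA xs (xs.length / 2) 0]
  simp

lemma B_eq (xs : List Int) :
    odometer_alt xs = ((List.range (xs.length / 2)).map (pvE xs)).sum := by
  show (((PySem.List.slice? xs (some 0) none 2).getD []).zip
      ((((0 : Int) :: (PySem.List.slice? xs (some 1) none 2).getD []).zip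
          ((PySem.List.slice? xs (some 1) none 2).getD [])).map (fun p => p.2 - p.1))
      |>.map (fun p => p.1 * p.2)).sum = _
  rw [evens_eq, odds_eq, consZipSelf, List.map_map,
    zipMapRange (fun k : Nat => PySem.List.pyGetD xs (2 * (k : Int)) 0)
      (fun k : Nat => ((fun p : Int × Int => p.2 - p.1) ∘
        (fun k : Nat => ((if k = 0 then (0 : Int) else PySem.List.pyGetD xs (2 * ((k - 1 : Nat) : Int) + 1) 0),
          PySem.List.pyGetD xs (2 * (k : Int) + 1) 0))) k)
      (xs.length / 2) ((xs.length + 1) / 2) (by omega),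
    List.map_map]
  apply congrArg
  apply List.map_congr_left
  intro k _
  show PySem.List.pyGetD xs (2 * (k : Int)) 0 *
      (PySem.List.pyGetD xs (2 * (k : Int) + 1) 0 -
        (if k = 0 then (0 : Int) else PySem.List.pyGetD xs (2 * ((k - 1 : Nat) : Int) + 1) 0))
    = pvE xs k
  rw [pvE, pvT]
  cases k with
  | zero => simp
  | succ j =>
    have h5 : (2:Int) * (((j + 1 - 1 : Nat)) : Int) + 1 = 2 * (((j + 1 : Nat)) : Int) - 1 := by
      push_cast; ring
    simp only [Nat.add_eq_zero_iff, one_ne_zero, and_false, if_false, h5]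

-- ===== VERDICT (by name: the statement is the Claim_ definition above) =====
theorem odometer_spec : Claim_equal_odometer := by
  intro xs _
  unfold Spec_odometer
  rw [A_eq, B_eq]
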